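-- pv_equiv track=rewrite | github.com/unknowncito/uknowncito.github.io | CMU_exercises.py | isBoxyValue
-- ===== SOURCE A (Python) =====
-- def isBoxyValue(board, value):
--     rows, cols = len(board), len(board[0])
--     row0, col0 = firstOccurrence(board, value)
--     row1, col1 = lastOccurrence(board, value)
--     if col1 < col0:
--         return False
--     for row in range(rows):
--         for col in range(cols):
--             if (row0 <= row <= row1) and (col0 <= col <= col1):
--                 # Check if a non-value is inside the box:
--                 if board[row][col] != value:
--                     return False
--             else:
--                 # Check if a value is outside the box:
--                 if board[row][col] == value:
--                     return False
--     return True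
--
-- def firstOccurrence(board, value):
--     rows, cols = len(board), len(board[0])
--     for row in range(rows):
--         for col in range(cols):
--             if board[row][col] == value:
--                 return (row, col)
--
-- def lastOccurrence(board, value):
--     rows, cols = len(board), len(board[0])
--     for row in range(rows):
--         for col in range(cols):
--             if board[row][col] == value:
--                 lastRow, lastCol = row, col
--     return (lastRow, lastCol)
-- ===== SOURCE B (Python) =====
-- def isBoxyValue(board, value):
--     cols = len(board[0])
--     cells = [(r, c) for r in range(len(board)) for c in range(cols)
--              if board[r][c] == value]
--     rs = [r for r, _ in cells]
--     cs = [c for _, c in cells]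
--     r0, r1, c0, c1 = min(rs), max(rs), min(cs), max(cs)
--     # boxy  <=>  the occurrences are exactly the full bounding box, row-major
--     return cells == [(r, c) for r in range(r0, r1 + 1) for c in range(c0, c1 + 1)]
-- ===== Notes on version B (the rewrite author's own statement) =====
-- stated objective: alternative
-- what changed: Instead of A's first/last-occurrence scan plus a per-cell inside/outside-the-box membership test, B collects the occurrence cells once, takes min/max row and column, and compares the occurrence list to the row-major enumeration of the full bounding box.
import Mathlib
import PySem

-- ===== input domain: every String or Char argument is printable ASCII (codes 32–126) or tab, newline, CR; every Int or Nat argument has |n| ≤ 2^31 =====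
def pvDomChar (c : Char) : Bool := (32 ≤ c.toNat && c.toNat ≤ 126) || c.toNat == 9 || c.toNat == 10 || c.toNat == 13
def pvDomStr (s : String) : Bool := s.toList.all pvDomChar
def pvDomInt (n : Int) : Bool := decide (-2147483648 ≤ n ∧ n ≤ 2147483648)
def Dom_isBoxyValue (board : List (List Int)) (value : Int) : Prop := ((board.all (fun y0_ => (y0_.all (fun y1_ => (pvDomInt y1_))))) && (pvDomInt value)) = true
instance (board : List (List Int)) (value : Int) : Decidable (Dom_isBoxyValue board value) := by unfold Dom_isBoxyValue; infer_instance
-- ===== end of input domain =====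

-- B checks "the occurrence cells, taken in row-major order, equal the row-major enumeration of
-- their bounding box" instead of A's first/last-occurrence scan with a per-cell box-membership test.

-- ===== PORT A =====

-- board[rc.1][rc.2] == value (none = IndexError, impossible inside Pre_)
def pvCell (board : List (List Int)) (value : Int) (rc : Int × Int) : Bool :=
  ((PySem.List.pyGet? board rc.1).bind (fun row => PySem.List.pyGet? row rc.2)) == some value

-- the row-major cell list of the nested 'for r in range(a,b): for c in range(cd,d)' loops
def pvRect (a b c d : Int) : List (Int × Int) :=
  (PySem.List.pyRange a b 1).flatMap (fun r => (PySem.List.pyRange c d 1).map (fun col => (r, col)))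

def firstOccurrence (board : List (List Int)) (value : Int) : Option (Int × Int) :=
  match PySem.List.pyGet? board 0 with
  | none => none        -- Python: len(board[0]) raises IndexError (outside Pre_)
  | some row0 =>
    (pvRect 0 board.length 0 row0.length).find? (pvCell board value)

def lastOccurrence (board : List (List Int)) (value : Int) : Option (Int × Int) :=
  match PySem.List.pyGet? board 0 with
  | none => none        -- Python: len(board[0]) raises IndexError (outside Pre_)
  | some row0 =>
    ((pvRect 0 board.length 0 row0.length).filter (pvCell board value)).getLast?

def isBoxyValue (board : List (List Int)) (value : Int) : Bool :=
  match PySem.List.pyGet? board 0 with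
  | none => false       -- Python: len(board[0]) raises IndexError (outside Pre_)
  | some row0 =>
    match firstOccurrence board value, lastOccurrence board value with
    | some (row0i, col0), some (row1, col1) =>
      if col1 < col0 then false
      else (pvRect 0 board.length 0 row0.length).all (fun rc =>
        if row0i ≤ rc.1 ∧ rc.1 ≤ row1 ∧ col0 ≤ rc.2 ∧ rc.2 ≤ col1
        then pvCell board value rc
        else !(pvCell board value rc))
    | _, _ => false     -- Python: unpacking None raises TypeError / UnboundLocalError (outside Pre_)

-- ===== PORT B =====

-- board[rc.1][rc.2] == value, B's own copy (none = IndexError, impossible inside Pre_)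
def pvCellB (board : List (List Int)) (value : Int) (rc : Int × Int) : Bool :=
  ((PySem.List.pyGet? board rc.1).bind (fun row => PySem.List.pyGet? row rc.2)) == some value

-- row-major enumeration of [(r, c) for r in range(a, b) for c in range(cd, d)], B's own copy
def pvRectB (a b c d : Int) : List (Int × Int) :=
  (PySem.List.pyRange a b 1).flatMap (fun r => (PySem.List.pyRange c d 1).map (fun col => (r, col)))

def isBoxyValue_alt (board : List (List Int)) (value : Int) : Bool :=
  -- Python: len(board[0]) raises IndexError on an empty board (outside Pre_), hence the Option.elim
  (PySem.List.pyGet? board 0).elim false (fun row0 =>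
    let cells := (PySem.List.pyRange 0 board.length 1).flatMap (fun r =>
      ((PySem.List.pyRange 0 row0.length 1).filter (fun c => pvCellB board value (r, c))).map
        (fun c => (r, c)))
    let rs := cells.map (fun rc => rc.1)
    let cs := cells.map (fun rc => rc.2)
    -- Python: min()/max() of an empty sequence raises ValueError (outside Pre_), hence the Option.elims
    (PySem.List.min? rs (fun x => x)).elim false (fun r0 =>
    (PySem.List.max? rs (fun x => x)).elim false (fun r1 =>
    (PySem.List.min? cs (fun x => x)).elim false (fun c0 =>
    (PySem.List.max? cs (fun x => x)).elim false (fun c1 =>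
      cells == pvRectB r0 (r1 + 1) c0 (c1 + 1))))))

-- ===== PRECONDITION & SPEC =====
-- Pre_ = exactly the inputs where A returns: nonempty board, no row shorter than row 0
-- (else IndexError) and value occurring in the first len(board[0]) columns of some row
-- (else unpacking None raises TypeError).
def Pre_isBoxyValue (board : List (List Int)) (value : Int) : Prop :=
  board ≠ [] ∧ (∀ row ∈ board, (board.headD []).length ≤ row.length) ∧
    ∃ row ∈ board, value ∈ row.take (board.headD []).length
instance (board : List (List Int)) (value : Int) : Decidable (Pre_isBoxyValue board value) := by
  unfold Pre_isBoxyValue; infer_instance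

def pvWitness_isBoxyValue : List (List Int) × Int := ([[1, 0], [0, 0]], 1)

def Spec_isBoxyValue (board : List (List Int)) (value : Int) (out : Bool) : Prop := out = isBoxyValue_alt board value
instance (board : List (List Int)) (value : Int) (out : Bool) : Decidable (Spec_isBoxyValue board value out) := by unfold Spec_isBoxyValue; infer_instance

-- ===== CLAIM (what is proved, stated in full; the proofs are below) =====
def Claim_equal_isBoxyValue : Prop := ∀ (board : List (List Int)) (value : Int), Dom_isBoxyValue board value → Pre_isBoxyValue board value → Spec_isBoxyValue board value (isBoxyValue board value)

-- ===== LEMMAS AND PROOFS =====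

theorem pvCellB_eq_pvCell : pvCellB = pvCell := rfl
theorem pvRectB_eq_pvRect : pvRectB = pvRect := rfl

-- strict row-major (lexicographic) order on cells
def pvLexLt (x y : Int × Int) : Prop := x.1 < y.1 ∨ (x.1 = y.1 ∧ x.2 < y.2)

theorem pvFind?_eq_head?_filter {α : Type} (p : α → Bool) (l : List α) :
    l.find? p = (l.filter p).head? := by
  induction l with
  | nil => rfl
  | cons a t ih =>
    by_cases h : p a = true
    · rw [List.find?_cons_of_pos h, List.filter_cons_of_pos h, List.head?_cons]
    · rw [List.find?_cons_of_neg h, List.filter_cons_of_neg h, ih]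

theorem pvMem_pvRect (a b c d : Int) (x : Int × Int) :
    x ∈ pvRect a b c d ↔ (a ≤ x.1 ∧ x.1 < b ∧ c ≤ x.2 ∧ x.2 < d) := by
  obtain ⟨r, co⟩ := x
  simp only [pvRect, List.mem_flatMap, List.mem_map, PySem.List.mem_pyRange_one, Prod.mk.injEq]
  constructor
  · rintro ⟨r', ⟨h1, h2⟩, c', ⟨h3, h4⟩, rfl, rfl⟩; exact ⟨h1, h2, h3, h4⟩
  · rintro ⟨h1, h2, h3, h4⟩; exact ⟨r, ⟨h1, h2⟩, co, ⟨h3, h4⟩, rfl, rfl⟩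

theorem pvPairwise_pvRect (a b c d : Int) : (pvRect a b c d).Pairwise pvLexLt := by
  unfold pvRect
  rw [List.pairwise_flatMap]
  constructor
  · intro r _
    rw [List.pairwise_map]
    exact (PySem.List.pairwise_lt_pyRange_one c d).imp (fun h => Or.inr ⟨rfl, h⟩)
  · refine (PySem.List.pairwise_lt_pyRange_one a b).imp ?_
    intro r1 r2 hlt x hx y hy
    simp only [List.mem_map] at hx hy
    obtain ⟨c1, _, rfl⟩ := hx; obtain ⟨c2, _, rfl⟩ := hy
    exact Or.inl hlt

theorem pvNodup_of_pairwise {l : List (Int × Int)} (h : l.Pairwise pvLexLt) : l.Nodup := by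
  refine h.imp ?_
  rintro a b hab rfl
  rcases hab with h1 | ⟨h1, h2⟩ <;> omega

theorem pvSorted_eq {l1 l2 : List (Int × Int)}
    (h1 : l1.Pairwise pvLexLt) (h2 : l2.Pairwise pvLexLt)
    (hm : ∀ x, x ∈ l1 ↔ x ∈ l2) : l1 = l2 := by
  refine List.Perm.eq_of_pairwise ?_ h1 h2
    ((List.perm_ext_iff_of_nodup (pvNodup_of_pairwise h1) (pvNodup_of_pairwise h2)).mpr hm)
  intro x y _ _ hxy hyx
  obtain ⟨x1, x2⟩ := x; obtain ⟨y1, y2⟩ := y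
  rcases hxy with h | ⟨h, h'⟩ <;> rcases hyx with g | ⟨g, g'⟩ <;>
    simp_all <;> omega

theorem pvHead_min {l : List (Int × Int)} (h : l.Pairwise pvLexLt) (hne : l ≠ []) :
    ∀ x ∈ l, x = l.head hne ∨ pvLexLt (l.head hne) x := by
  cases l with
  | nil => exact absurd rfl hne
  | cons a t =>
    rw [List.pairwise_cons] at h
    intro x hx
    rcases List.mem_cons.mp hx with rfl | hxt
    · exact Or.inl rfl
    · exact Or.inr (h.1 x hxt)

theorem pvLast_max {l : List (Int × Int)} (h : l.Pairwise pvLexLt) (hne : l ≠ []) :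
    ∀ x ∈ l, x = l.getLast hne ∨ pvLexLt x (l.getLast hne) := by
  induction l with
  | nil => exact absurd rfl hne
  | cons a t ih =>
    rw [List.pairwise_cons] at h
    intro x hx
    cases t with
    | nil => simp at hx; simp [hx]
    | cons b u =>
      rw [List.getLast_cons (by simp)]
      rcases List.mem_cons.mp hx with rfl | hxt
      · exact Or.inr (h.1 _ (List.getLast_mem _))
      · exact ih h.2 (by simp) x hxt

-- ===== VERDICT (by name: the statement is the Claim_ definition above) =====
theorem isBoxyValue_spec : Claim_equal_isBoxyValue := by
  intro board value _hdom hpre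
  unfold Spec_isBoxyValue
  obtain ⟨hne, hrowlen, hocc⟩ := hpre
  obtain ⟨row0, rest, rfl⟩ : ∃ r t, board = r :: t := by
    cases board with
    | nil => exact absurd rfl hne
    | cons a t => exact ⟨a, t, rfl⟩
  have hget0 : PySem.List.pyGet? (row0 :: rest) 0 = some row0 :=
    PySem.List.pyGet?_zero_cons _ _
  have hrowlen' : ∀ row ∈ (row0 :: rest), row0.length ≤ row.length := by
    simpa using hrowlen
  -- the occurrence list L
  set R : Int := (((row0 :: rest) : List (List Int)).length : Int) with hRdef
  set C : Int := ((row0.length : Nat) : Int) with hCdef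
  set p : Int × Int → Bool := pvCell (row0 :: rest) value with hpdef
  set L : List (Int × Int) := (pvRect 0 R 0 C).filter p with hLdef
  have hmemL : ∀ x, x ∈ L ↔ (x ∈ pvRect 0 R 0 C ∧ p x = true) := by
    intro x; rw [hLdef, List.mem_filter]
  -- the cell predicate on in-range Nat indices
  have hcell : ∀ (i j : Nat) (row : List Int), (row0 :: rest)[i]? = some row → j < row.length →
      (p ((i : Int), (j : Int)) = true ↔ row[j]! = value) := by
    intro i j row hi hj
    rw [hpdef]
    simp only [pvCell, PySem.List.pyGet?_natCast, hi, Option.bind_some]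
    rw [List.getElem?_eq_getElem hj]
    simp [List.getElem!_eq_getElem?_getD, List.getElem?_eq_getElem hj]
  -- L is nonempty
  have hLne : L ≠ [] := by
    obtain ⟨row, hrow, hv⟩ := hocc
    obtain ⟨i, hi, hieq⟩ := List.getElem_of_mem hrow
    obtain ⟨j, hj, hjeq⟩ := List.getElem_of_mem hv
    have hjC : j < row0.length := lt_of_lt_of_le hj (by simp [List.length_take])
    have hjr : j < row.length := lt_of_lt_of_le hj (by simp [List.length_take])
    have hjval : row[j]! = value := by
      rw [List.getElem_take] at hjeq
      simp [List.getElem!_eq_getElem?_getD, List.getElem?_eq_getElem hjr, hjeq]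
    have hmem : ((i : Int), (j : Int)) ∈ L := by
      rw [hmemL]
      constructor
      · rw [pvMem_pvRect]
        refine ⟨by positivity, ?_, by positivity, ?_⟩
        · simp only [hRdef]; exact_mod_cast hi
        · simp only [hCdef]; exact_mod_cast hjC
      · rw [hcell i j row (by rw [List.getElem?_eq_getElem hi, hieq]) hjr]
        exact hjval
    intro h; rw [h] at hmem; exact absurd hmem (List.not_mem_nil)
  -- order facts about L
  have hLpw : L.Pairwise pvLexLt := (pvPairwise_pvRect 0 R 0 C).filter p
  have hhead : L.head? = some (L.head hLne) := List.head?_eq_some_head hLne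
  have hlast : L.getLast? = some (L.getLast hLne) := List.getLast?_eq_some_getLast hLne
  set fo : Int × Int := L.head hLne with hfodef
  set lo : Int × Int := L.getLast hLne with hlodef
  have hfomem : fo ∈ L := by rw [hfodef]; exact List.head_mem hLne
  have hlomem : lo ∈ L := by rw [hlodef]; exact List.getLast_mem hLne
  have hfomin : ∀ x ∈ L, x = fo ∨ pvLexLt fo x := pvHead_min hLpw hLne
  have hlomax : ∀ x ∈ L, x = lo ∨ pvLexLt x lo := pvLast_max hLpw hLne
  -- min/max of the row/col projections
  rcases hminr : PySem.List.min? (L.map (fun rc => rc.1)) (fun x => x) with _ | a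
  · rw [PySem.List.min?_eq_none_iff, List.map_eq_nil_iff] at hminr; exact absurd hminr hLne
  rcases hmaxr : PySem.List.max? (L.map (fun rc => rc.1)) (fun x => x) with _ | b
  · rw [PySem.List.max?_eq_none_iff, List.map_eq_nil_iff] at hmaxr; exact absurd hmaxr hLne
  rcases hminc : PySem.List.min? (L.map (fun rc => rc.2)) (fun x => x) with _ | c
  · rw [PySem.List.min?_eq_none_iff, List.map_eq_nil_iff] at hminc; exact absurd hminc hLne
  rcases hmaxc : PySem.List.max? (L.map (fun rc => rc.2)) (fun x => x) with _ | d
  · rw [PySem.List.max?_eq_none_iff, List.map_eq_nil_iff] at hmaxc; exact absurd hmaxc hLne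
  have hale : ∀ x ∈ L, a ≤ x.1 := fun x hx =>
    PySem.List.min?_isMin hminr x.1 (List.mem_map_of_mem hx)
  have hble : ∀ x ∈ L, x.1 ≤ b := fun x hx =>
    PySem.List.max?_isMax hmaxr x.1 (List.mem_map_of_mem hx)
  have hcle : ∀ x ∈ L, c ≤ x.2 := fun x hx =>
    PySem.List.min?_isMin hminc x.2 (List.mem_map_of_mem hx)
  have hdle : ∀ x ∈ L, x.2 ≤ d := fun x hx =>
    PySem.List.max?_isMax hmaxc x.2 (List.mem_map_of_mem hx)
  have ha_ex : ∃ x ∈ L, x.1 = a := by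
    have := PySem.List.min?_mem hminr; simpa [List.mem_map, eq_comm] using this
  have hb_ex : ∃ x ∈ L, x.1 = b := by
    have := PySem.List.max?_mem hmaxr; simpa [List.mem_map, eq_comm] using this
  have hc_ex : ∃ x ∈ L, x.2 = c := by
    have := PySem.List.min?_mem hminc; simpa [List.mem_map, eq_comm] using this
  have hd_ex : ∃ x ∈ L, x.2 = d := by
    have := PySem.List.max?_mem hmaxc; simpa [List.mem_map, eq_comm] using this
  -- a and b are the first and last row indices
  have hafo : a = fo.1 := by
    obtain ⟨x, hx, hxa⟩ := ha_ex
    have h1 := hale fo hfomem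
    rcases hfomin x hx with rfl | hlt
    · omega
    · rcases hlt with h | ⟨h, _⟩ <;> omega
  have hblo : b = lo.1 := by
    obtain ⟨x, hx, hxb⟩ := hb_ex
    have h1 := hble lo hlomem
    rcases hlomax x hx with rfl | hlt
    · omega
    · rcases hlt with h | ⟨h, _⟩ <;> omega
  -- reduce both ports
  have hcells : (PySem.List.pyRange 0 R 1).flatMap (fun r =>
      ((PySem.List.pyRange 0 C 1).filter (fun cc => p (r, cc))).map (fun cc => (r, cc))) = L := by
    rw [hLdef]
    unfold pvRect
    rw [List.filter_flatMap]
    simp only [List.filter_map]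
    rfl
  obtain ⟨r0, c0⟩ := fo
  obtain ⟨r1, c1⟩ := lo
  simp only [isBoxyValue, isBoxyValue_alt, firstOccurrence, lastOccurrence, hget0,
    Option.elim_some, pvFind?_eq_head?_filter, pvCellB_eq_pvCell, pvRectB_eq_pvRect]
  simp only [← hRdef, ← hCdef, ← hpdef, ← hLdef, hcells, hhead, hlast, hminr, hmaxr, hminc, hmaxc]
  simp only at hafo hblo
  have hfb := ((hmemL _).mp hfomem).1
  have hlb := ((hmemL _).mp hlomem).1
  rw [pvMem_pvRect] at hfb hlb
  simp only at hfb hlb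
  rw [Bool.eq_iff_iff]
  constructor
  · intro hAt
    by_cases hcc : c1 < c0
    · rw [if_pos hcc] at hAt; exact absurd hAt (by simp)
    rw [if_neg hcc, List.all_eq_true] at hAt
    have hr0r1 : r0 ≤ r1 := by
      rcases hlomax _ hfomem with heq | hlt
      · simp only [Prod.mk.injEq] at heq; omega
      · rcases hlt with h | ⟨h, _⟩ <;> simp only at h <;> omega
    have hLbox : L = pvRect r0 (r1 + 1) c0 (c1 + 1) := by
      refine pvSorted_eq hLpw (pvPairwise_pvRect _ _ _ _) ?_
      intro x
      constructor
      · intro hx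
        obtain ⟨hxg, hpx⟩ := (hmemL x).mp hx
        have hchk := hAt x hxg
        by_cases hin : r0 ≤ x.1 ∧ x.1 ≤ r1 ∧ c0 ≤ x.2 ∧ x.2 ≤ c1
        · rw [pvMem_pvRect]; omega
        · rw [if_neg hin, hpx] at hchk; simp at hchk
      · intro hx
        rw [pvMem_pvRect] at hx
        have hxg : x ∈ pvRect 0 R 0 C := by rw [pvMem_pvRect]; omega
        have hchk := hAt x hxg
        rw [if_pos ⟨hx.1, by omega, hx.2.2.1, by omega⟩] at hchk
        exact (hmemL x).mpr ⟨hxg, hchk⟩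
    have hcc0 : c = c0 := by
      have h1 := hcle _ hfomem
      simp only at h1
      obtain ⟨x, hx, hxc⟩ := hc_ex
      rw [hLbox, pvMem_pvRect] at hx
      omega
    have hdc1 : d = c1 := by
      have h1 := hdle _ hlomem
      simp only at h1
      obtain ⟨x, hx, hxd⟩ := hd_ex
      rw [hLbox, pvMem_pvRect] at hx
      omega
    simp only [Option.elim_some, beq_iff_eq]
    rw [hafo, hblo, hcc0, hdc1]
    exact hLbox
  · intro hBt
    simp only [Option.elim_some, beq_iff_eq] at hBt
    have hab : a ≤ b := by obtain ⟨x, hx, rfl⟩ := hb_ex; exact hale x hx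
    have hcd : c ≤ d := by obtain ⟨x, hx, rfl⟩ := hd_ex; exact hcle x hx
    have hacL : ((a, c) : Int × Int) ∈ L := by
      rw [hBt, pvMem_pvRect]; simp only; omega
    have hbdL : ((b, d) : Int × Int) ∈ L := by
      rw [hBt, pvMem_pvRect]; simp only; omega
    have hfoeq : r0 = a ∧ c0 = c := by
      have h1 := hale _ hfomem
      have h2 := hcle _ hfomem
      simp only at h1 h2
      rcases hfomin _ hacL with heq | hlt
      · simp only [Prod.mk.injEq] at heq; omega
      · rcases hlt with h | ⟨h, h'⟩
        · simp only at h; omega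
        · simp only at h h'; omega
    have hloeq : r1 = b ∧ c1 = d := by
      have h1 := hble _ hlomem
      have h2 := hdle _ hlomem
      simp only at h1 h2
      rcases hlomax _ hbdL with heq | hlt
      · simp only [Prod.mk.injEq] at heq; omega
      · rcases hlt with h | ⟨h, h'⟩
        · simp only at h; omega
        · simp only at h h'; omega
    rw [if_neg (by omega : ¬ c1 < c0), List.all_eq_true]
    intro x hxg
    by_cases hin : r0 ≤ x.1 ∧ x.1 ≤ r1 ∧ c0 ≤ x.2 ∧ x.2 ≤ c1
    · rw [if_pos hin]
      have hxL : x ∈ L := by rw [hBt, pvMem_pvRect]; omega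
      exact ((hmemL x).mp hxL).2
    · rw [if_neg hin]
      have hpx : p x ≠ true := by
        intro hpx
        have hxL : x ∈ L := (hmemL x).mpr ⟨hxg, hpx⟩
        rw [hBt, pvMem_pvRect] at hxL
        exact hin ⟨by omega, by omega, by omega, by omega⟩
      simp [hpx]
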